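-- pv_equiv track=rewrite | github.com/greenlight2000/InspectCoder | inspectcoder.py | _split_code_blocks
-- ===== SOURCE A (Python) =====
-- def _split_code_blocks(code: str) -> list[str]:
--     """
--     Split multi-line code into blocks based on non-indented lines.
--     Each block starts with a non-indented line and includes all subsequent
--     indented lines until the next non-indented line.
--
--     Args:
--         code (str): The input code string
--
--     Returns:
--         list[str]: List of code blocks
--     """
--     code = code.strip()
--     if '\n' not in code:
--         return [code]
--
--     lines = code.split('\n')
--     blocks = []
--     current_block = []
--
--     for line in lines:
--         stripped_line = line.strip()
--         # Skip empty lines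
--         if not stripped_line:
--             if current_block:
--                 current_block.append(line)
--             continue
--
--         # If line has no indentation and we have a current block
--         if line == stripped_line and current_block:
--             # Save the current block
--             blocks.append('\n'.join(current_block))
--             current_block = [line]
--         else:
--             current_block.append(line)
--
--     # Don't forget to add the last block
--     if current_block:
--         blocks.append('\n'.join(current_block))
--
--     return blocks
-- ===== SOURCE B (Python) =====
-- def _is_block_start(line):
--     stripped = line.strip()
--     return bool(stripped) and line == stripped
--
--
-- def _split_code_blocks(code):
--     code = code.strip()
--     if '\n' not in code:
--         return [code]
--
--     lines = code.split('\n')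
--     blocks = []
--     i = 0
--     n = len(lines)
--     while i < n:
--         # scan forward to the start of the next block
--         j = i + 1
--         while j < n and not _is_block_start(lines[j]):
--             j += 1
--         blocks.append('\n'.join(lines[i:j]))
--         i = j
--     return blocks
-- ===== Notes on version B (the rewrite author's own statement) =====
-- stated objective: alternative
-- what changed: Replaced A's per-line state machine (accumulating a current block and flushing it on each non-indented line) by a boundary-scanning pass: for each block start, scan forward to the next non-indented non-empty line and emit the slice between the two boundaries.
import Mathlib
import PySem

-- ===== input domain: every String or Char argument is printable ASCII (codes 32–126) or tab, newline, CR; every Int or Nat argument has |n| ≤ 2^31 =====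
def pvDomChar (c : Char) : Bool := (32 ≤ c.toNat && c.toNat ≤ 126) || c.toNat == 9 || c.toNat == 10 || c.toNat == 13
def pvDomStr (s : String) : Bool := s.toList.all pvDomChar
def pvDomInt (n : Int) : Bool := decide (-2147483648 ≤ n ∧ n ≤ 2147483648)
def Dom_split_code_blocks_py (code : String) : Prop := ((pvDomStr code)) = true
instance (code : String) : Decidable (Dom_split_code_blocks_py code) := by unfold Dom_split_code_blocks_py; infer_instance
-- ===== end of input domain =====

-- B replaces A's per-line state machine by a boundary-scan-and-slice decomposition (alternative, same cost).


-- ===== PORT A =====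
-- A's loop body: state = (blocks, current_block)
def aStep (st : List String × List (List Char)) (line : List Char) : List String × List (List Char) :=
  let stripped := PySem.Chars.strip line
  if stripped.isEmpty then
    if st.2.isEmpty then st else (st.1, st.2 ++ [line])
  else if line == stripped && !st.2.isEmpty then
    (st.1 ++ [String.ofList (PySem.Chars.join ['\n'] st.2)], [line])
  else
    (st.1, st.2 ++ [line])

def split_code_blocks_py (code : String) : List String :=
  let code := PySem.Chars.strip code.toList
  if !PySem.Chars.isIn ['\n'] code then [String.ofList code]
  else
    let lines := PySem.Chars.splitOn code ['\n']
    let st := lines.foldl aStep ([], [])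
    if st.2.isEmpty then st.1 else st.1 ++ [String.ofList (PySem.Chars.join ['\n'] st.2)]

-- ===== PORT B =====
def isBlockStart (line : List Char) : Bool :=
  let stripped := PySem.Chars.strip line
  !stripped.isEmpty && line == stripped

-- B's outer loop: take a block (its start line plus the following non-start lines), recurse on the rest
def altBlocks : List (List Char) → List String
  | [] => []
  | h :: t =>
    String.ofList (PySem.Chars.join ['\n'] (h :: t.takeWhile (fun l => !isBlockStart l)))
      :: altBlocks (t.dropWhile (fun l => !isBlockStart l))
termination_by l => l.length
decreasing_by
  simp only [List.length_cons]
  exact Nat.lt_succ_of_le (List.length_dropWhile_le _ _)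

def split_code_blocks_py_alt (code : String) : List String :=
  let code := PySem.Chars.strip code.toList
  if !PySem.Chars.isIn ['\n'] code then [String.ofList code]
  else altBlocks (PySem.Chars.splitOn code ['\n'])

-- ===== PRECONDITION & SPEC =====
def Spec_split_code_blocks_py (code : String) (out : List String) : Prop := out = split_code_blocks_py_alt code
instance (code : String) (out : List String) : Decidable (Spec_split_code_blocks_py code out) := by unfold Spec_split_code_blocks_py; infer_instance

-- ===== CLAIM (what is proved, stated in full; the proofs are below) =====
def Claim_equal_split_code_blocks_py : Prop := ∀ (code : String), Dom_split_code_blocks_py code → Spec_split_code_blocks_py code (split_code_blocks_py code)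

-- ===== LEMMAS AND PROOFS =====

-- unfolding lemma for altBlocks on a cons
lemma altBlocks_cons (h : List Char) (t : List (List Char)) :
    altBlocks (h :: t)
      = String.ofList (PySem.Chars.join ['\n'] (h :: t.takeWhile (fun l => !isBlockStart l)))
          :: altBlocks (t.dropWhile (fun l => !isBlockStart l)) := by
  conv_lhs => rw [altBlocks.eq_def]

-- shape of splitOn's worker: the first piece extends the pending chunk `cur`
lemma go_shape (sep : List Char) (fuel : Nat) :
    ∀ (l cur : List Char) (acc : List (List Char)),
      ∃ t rest', PySem.Chars.splitOn.go sep fuel l cur acc = acc.reverse ++ (cur.reverse ++ t) :: rest' := by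
  induction fuel with
  | zero =>
    intro l cur acc
    exact ⟨l, [], by simp [PySem.Chars.splitOn.go]⟩
  | succ fuel ih =>
    intro l cur acc
    cases l with
    | nil => exact ⟨[], [], by simp [PySem.Chars.splitOn.go]⟩
    | cons c rest =>
      by_cases hp : sep.isPrefixOf (c :: rest) = true
      · obtain ⟨t, rest', h⟩ := ih (List.drop sep.length (c :: rest)) [] (cur.reverse :: acc)
        refine ⟨[], t :: rest', ?_⟩
        simp only [PySem.Chars.splitOn.go, hp, if_true]
        simp [h]
      · obtain ⟨t, rest', h⟩ := ih rest (c :: cur) acc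
        refine ⟨c :: t, rest', ?_⟩
        simp only [PySem.Chars.splitOn.go, hp]
        simp [h]

lemma strip_cons_ne_nil {c : Char} (t : List Char) (hc : PySem.Chars.isspace c = false) :
    PySem.Chars.strip (c :: t) ≠ [] := by
  intro h
  simp only [PySem.Chars.strip, PySem.Chars.lstrip, PySem.Chars.rstrip,
    List.dropWhile_cons, hc, Bool.false_eq_true, if_false] at h
  rw [List.reverse_eq_nil_iff, List.dropWhile_eq_nil_iff] at h
  have := h c (by simp)
  simp [hc] at this

-- a non-empty strip result starts with a non-space character
lemma strip_head_nonspace {x : List Char} {c : Char} {u : List Char}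
    (h : PySem.Chars.strip x = c :: u) : PySem.Chars.isspace c = false := by
  have hpre : (List.dropWhile PySem.Chars.isspace (PySem.Chars.lstrip x).reverse).reverse
      <+: PySem.Chars.lstrip x := by
    have h' := (List.dropWhile_suffix (l := (PySem.Chars.lstrip x).reverse) PySem.Chars.isspace).reverse
    rwa [List.reverse_reverse] at h'
  rw [PySem.Chars.strip, PySem.Chars.rstrip] at h
  rw [h] at hpre
  obtain ⟨tl, htl⟩ := hpre
  have hls : PySem.Chars.lstrip x = c :: (u ++ tl) := by simp [← htl]
  rw [PySem.Chars.lstrip] at hls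
  have hw : List.dropWhile PySem.Chars.isspace x ≠ [] := by simp [hls]
  have hhead := List.head_dropWhile_not PySem.Chars.isspace hw
  have hh : (List.dropWhile PySem.Chars.isspace x).head hw = c := by simp [hls]
  rwa [hh] at hhead

-- A's loop run from a non-empty current block: it emits that block (joined with the
-- following non-start lines) and then B's blocks of the remaining lines
lemma aLoop (lines : List (List Char)) :
    ∀ (blocks : List String) (cur : List (List Char)), cur ≠ [] →
    (if (lines.foldl aStep (blocks, cur)).2.isEmpty then (lines.foldl aStep (blocks, cur)).1
     else (lines.foldl aStep (blocks, cur)).1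
        ++ [String.ofList (PySem.Chars.join ['\n'] (lines.foldl aStep (blocks, cur)).2)])
    = blocks ++ String.ofList (PySem.Chars.join ['\n'] (cur ++ lines.takeWhile (fun l => !isBlockStart l)))
        :: altBlocks (lines.dropWhile (fun l => !isBlockStart l)) := by
  induction lines with
  | nil =>
    intro blocks cur hcur
    simp [altBlocks, List.isEmpty_iff, hcur]
  | cons l rest ih =>
    intro blocks cur hcur
    simp only [List.foldl_cons]
    by_cases h1 : (PySem.Chars.strip l).isEmpty
    · have hstep : aStep (blocks, cur) l = (blocks, cur ++ [l]) := by
        simp [aStep, h1, List.isEmpty_iff, hcur]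
      have hstart : isBlockStart l = false := by simp [isBlockStart, h1]
      rw [hstep, ih blocks (cur ++ [l]) (by simp)]
      simp [hstart, List.append_assoc]
    · by_cases h2 : l = PySem.Chars.strip l
      · have hlne : l ≠ [] := by intro h; subst h; exact h1 (by decide)
        have hstart : isBlockStart l = true := by simp [isBlockStart, ← h2, hlne]
        have hstep : aStep (blocks, cur) l
            = (blocks ++ [String.ofList (PySem.Chars.join ['\n'] cur)], [l]) := by
          simp [aStep, ← h2, List.isEmpty_iff, hcur, hlne]
        rw [hstep, ih _ [l] (by simp)]
        have htw : List.takeWhile (fun l => !isBlockStart l) (l :: rest) = [] := by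
          simp [hstart]
        have hdw : List.dropWhile (fun l => !isBlockStart l) (l :: rest) = l :: rest := by
          simp [hstart]
        rw [htw, hdw, altBlocks_cons]
        simp
      · have hstart : isBlockStart l = false := by simp [isBlockStart, h2]
        have hstep : aStep (blocks, cur) l = (blocks, cur ++ [l]) := by
          simp [aStep, h1, h2]
        rw [hstep, ih blocks (cur ++ [l]) (by simp)]
        simp [hstart, List.append_assoc]

-- ===== VERDICT (by name: the statement is the Claim_ definition above) =====
theorem split_code_blocks_py_spec : Claim_equal_split_code_blocks_py := by
  intro code _
  unfold Spec_split_code_blocks_py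
  simp only [split_code_blocks_py, split_code_blocks_py_alt]
  by_cases hin : PySem.Chars.isIn ['\n'] (PySem.Chars.strip code.toList) = true
  · simp only [hin, Bool.not_true]
    have hne : PySem.Chars.strip code.toList ≠ [] := by
      intro h
      rw [h] at hin
      have := (PySem.Chars.isIn_iff_infix _ _).mp hin
      simp at this
    obtain ⟨c, rest, hsplit⟩ := List.exists_cons_of_ne_nil hne
    have hc : PySem.Chars.isspace c = false := strip_head_nonspace hsplit
    have hcn : c ≠ '\n' := by
      intro h; rw [h] at hc; exact absurd hc (by decide)
    have hpf : List.isPrefixOf ['\n'] (c :: rest) = false := by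
      simp [List.isPrefixOf]
      exact fun h => absurd h.symm hcn
    obtain ⟨t, rest', hgo⟩ := go_shape ['\n'] (rest.length + 1) rest [c] []
    have hlines : PySem.Chars.splitOn (PySem.Chars.strip code.toList) ['\n']
        = (c :: t) :: rest' := by
      rw [PySem.Chars.splitOn, hsplit]
      show PySem.Chars.splitOn.go ['\n'] ((c :: rest).length + 1) (c :: rest) [] [] = _
      rw [List.length_cons]
      rw [show PySem.Chars.splitOn.go ['\n'] (rest.length + 1 + 1) (c :: rest) [] []
            = PySem.Chars.splitOn.go ['\n'] (rest.length + 1) rest [c] [] by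
        simp [PySem.Chars.splitOn.go, hpf]]
      simp [hgo]
    rw [hlines]
    have hstrip1 : (PySem.Chars.strip (c :: t)).isEmpty = false := by
      simp
      exact strip_cons_ne_nil t hc
    have hfirst : aStep ([], []) (c :: t) = ([], [c :: t]) := by
      simp [aStep, hstrip1]
    rw [List.foldl_cons, hfirst]
    rw [aLoop rest' [] [c :: t] (by simp), altBlocks_cons]
    simp
  · simp only [Bool.not_eq_true] at hin
    simp [hin]
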